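-- pv_equiv track=rewrite | github.com/bcongdon/advent_of_code_2017 | Day1-9/3.py | spiral2
-- ===== SOURCE A (Python) =====
-- def next_location(x, y):
--     det = max(abs(x), abs(y))
--
--     # Exit current shell
--     if det == x and det == -y:
--         return (x+1, y)
--     # Up
--     elif det == x and det != y:
--         return (x, y+1)
--     # Left
--     elif det == y and det != -x:
--         return (x-1, y)
--     # Down
--     elif det == -x and det != -y:
--         return (x, y-1)
--     # Right
--     elif det == -y:
--         return (x+1, y)
--
-- def spiral2(n):
--     mem = {}
--     mem[(0, 0)] = 1
--     loc = (1, 0)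
--
--     cost = 0
--     while cost <= n:
--         cost = 0
--         for i in [-1, 0, 1]:
--             for j in [-1, 0, 1]:
--                 cx, cy = loc
--                 if (cx + i, cy + j) in mem:
--                     cost += mem[(cx + i, cy + j)]
--         mem[loc] = cost
--         loc = next_location(loc[0], loc[1])
--     return cost
-- ===== SOURCE B (Python) =====
-- def spiral2(n):
--     # Classic spiral walker: direction vector rotated left when the current
--     # segment is exhausted; segment length growing by one every second turn.
--     mem = {(0, 0): 1}
--     x = y = 0
--     dx, dy = 1, 0
--     seg, cnt = 1, 0
--     cost = 0
--     while cost <= n: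
--         x += dx
--         y += dy
--         cnt += 1
--         if cnt == seg:
--             cnt = 0
--             dx, dy = -dy, dx
--             if dy == 0:
--                 seg += 1
--         cost = sum(mem.get((x + i, y + j), 0) for i in (-1, 0, 1) for j in (-1, 0, 1))
--         mem[(x, y)] = cost
--     return cost
-- ===== Notes on version B (the rewrite author's own statement) =====
-- stated objective: alternative
-- what changed: Replaced next_location's shell/determinant coordinate case analysis with a spiral-walker automaton: a direction vector rotated left whenever the current segment is exhausted, with the segment length growing by one every second turn; the neighbor-sum memo loop stays.
import Mathlib
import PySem

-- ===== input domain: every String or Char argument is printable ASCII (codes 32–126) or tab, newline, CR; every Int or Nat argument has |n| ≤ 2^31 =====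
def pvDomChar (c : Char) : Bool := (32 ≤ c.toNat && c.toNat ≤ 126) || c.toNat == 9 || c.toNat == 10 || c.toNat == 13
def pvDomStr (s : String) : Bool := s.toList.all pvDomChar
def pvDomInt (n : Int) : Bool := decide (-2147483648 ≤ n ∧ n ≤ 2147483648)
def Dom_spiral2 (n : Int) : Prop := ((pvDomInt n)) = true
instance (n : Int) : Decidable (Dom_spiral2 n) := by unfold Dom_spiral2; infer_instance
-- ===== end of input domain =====

-- B replaces A's shell/determinant next-cell formula by a rotating-direction spiral
-- walker with growing segment lengths (objective: alternative movement generator).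
-- Both loops carry fuel 256 and return the accumulator on exhaustion; the proof shows
-- the two loops agree in lockstep for EVERY fuel, so the claim holds for all n.

-- ===== PORT A =====
-- Python returns None when no branch fires (never reached from spiral2); ported as Option.
def next_location (x y : Int) : Option (Int × Int) :=
  let det := max |x| |y|
  if det = x ∧ det = -y then some (x + 1, y)
  else if det = x ∧ det ≠ y then some (x, y + 1)
  else if det = y ∧ det ≠ -x then some (x - 1, y)
  else if det = -x ∧ det ≠ -y then some (x, y - 1)
  else if det = -y then some (x + 1, y)
  else none

-- cost = 0; for i in [-1,0,1]: for j in [-1,0,1]: if (cx+i,cy+j) in mem: cost += mem[...]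
-- (mem[key] is exact as getD under the contains guard)
def costA (mem : PySem.Dict (Int × Int) Int) (loc : Int × Int) : Int :=
  List.foldl (fun cost i =>
    List.foldl (fun cost j =>
      if mem.contains (loc.1 + i, loc.2 + j) then
        cost + mem.getD (loc.1 + i, loc.2 + j) 0
      else cost) cost [-1, 0, 1]) 0 [-1, 0, 1]

def loopA (n : Int) : Nat → PySem.Dict (Int × Int) Int → Option (Int × Int) → Int → Int
  | 0, _, _, cost => cost
  | Nat.succ f, mem, loc?, cost =>
    if cost ≤ n then
      match loc? with
      | none => 0  -- Python: `cx, cy = loc` would raise TypeError; unreachable from spiral2's start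
      | some loc =>
          let cost' := costA mem loc
          loopA n f (mem.insert loc cost') (next_location loc.1 loc.2) cost'
    else cost

def spiral2 (n : Int) : Int :=
  loopA n 256 ((PySem.Dict.empty).insert (0, 0) 1) (some (1, 0)) 0

-- ===== PORT B =====
-- walker state: position, direction vector, segment length, steps taken in segment
structure WState where
  x : Int
  y : Int
  dx : Int
  dy : Int
  seg : Int
  cnt : Int
deriving DecidableEq, Repr

-- x += dx; y += dy; cnt += 1; if cnt == seg: cnt = 0; dx,dy = -dy,dx; if dy == 0: seg += 1
def stepW (s : WState) : WState :=
  let x := s.x + s.dx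
  let y := s.y + s.dy
  let cnt := s.cnt + 1
  if cnt = s.seg then
    let dx := -s.dy
    let dy := s.dx
    ⟨x, y, dx, dy, if dy = 0 then s.seg + 1 else s.seg, 0⟩
  else
    ⟨x, y, s.dx, s.dy, s.seg, cnt⟩

-- sum(mem.get((x+i, y+j), 0) for i in (-1,0,1) for j in (-1,0,1))
def costB (mem : PySem.Dict (Int × Int) Int) (x y : Int) : Int :=
  (([-1, 0, 1] : List Int).flatMap (fun i =>
      ([-1, 0, 1] : List Int).map (fun j => mem.getD (x + i, y + j) 0))).sum

def loopB (n : Int) : Nat → PySem.Dict (Int × Int) Int → WState → Int → Int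
  | 0, _, _, cost => cost
  | Nat.succ f, mem, s, cost =>
    if cost ≤ n then
      let s' := stepW s
      let cost' := costB mem s'.x s'.y
      loopB n f (mem.insert (s'.x, s'.y) cost') s' cost'
    else cost

def spiral2_alt (n : Int) : Int :=
  loopB n 256 ((PySem.Dict.empty).insert (0, 0) 1) ⟨0, 0, 1, 0, 1, 0⟩ 0

-- ===== PRECONDITION & SPEC =====
def Spec_spiral2 (n : Int) (out : Int) : Prop := out = spiral2_alt n
instance (n : Int) (out : Int) : Decidable (Spec_spiral2 n out) := by unfold Spec_spiral2; infer_instance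

-- ===== CLAIM (what is proved, stated in full; the proofs are below) =====
def Claim_equal_spiral2 : Prop := ∀ (n : Int), Dom_spiral2 n → Spec_spiral2 n (spiral2 n)

-- ===== LEMMAS AND PROOFS =====

-- reachable walker states: position determined by direction, segment length and step count
def ValidW (s : WState) : Prop :=
  0 ≤ s.cnt ∧ s.cnt < s.seg ∧
  ((s.dx = 1 ∧ s.dy = 0 ∧ ∃ k : Int, 0 ≤ k ∧ s.seg = 2 * k + 1 ∧ s.x = -k + s.cnt ∧ s.y = -k) ∨
   (s.dx = 0 ∧ s.dy = 1 ∧ ∃ k : Int, 0 ≤ k ∧ s.seg = 2 * k + 1 ∧ s.x = k + 1 ∧ s.y = -k + s.cnt) ∨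
   (s.dx = -1 ∧ s.dy = 0 ∧ ∃ m : Int, 1 ≤ m ∧ s.seg = 2 * m ∧ s.x = m - s.cnt ∧ s.y = m) ∨
   (s.dx = 0 ∧ s.dy = -1 ∧ ∃ m : Int, 1 ≤ m ∧ s.seg = 2 * m ∧ s.x = -m ∧ s.y = m - s.cnt))

lemma step_ok (s : WState) (h : ValidW s) :
    next_location s.x s.y = some ((stepW s).x, (stepW s).y) ∧ ValidW (stepW s) := by
  obtain ⟨hc0, hcs, hdir⟩ := h
  by_cases hturn : s.cnt + 1 = s.seg
  · rcases hdir with ⟨hdx, hdy, k, hk, hseg, hx, hy⟩ | ⟨hdx, hdy, k, hk, hseg, hx, hy⟩ |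
      ⟨hdx, hdy, m, hm, hseg, hx, hy⟩ | ⟨hdx, hdy, m, hm, hseg, hx, hy⟩
    · -- right, segment ends: turn to up
      have hstep : stepW s = ⟨s.x + 1, s.y, 0, 1, s.seg, 0⟩ := by
        simp [stepW, hdx, hdy, hturn]
      rw [hstep]
      have h1 : |s.y| = k := by rw [hy, abs_neg, abs_of_nonneg hk]
      have h2 : |s.x| ≤ k := abs_le.mpr ⟨by omega, by omega⟩
      have hdet : max |s.x| |s.y| = k := by rw [h1]; exact max_eq_right h2
      constructor
      · simp only [next_location]
        rw [hdet]
        split_ifs <;> first | rfl | omega | (simp only [Option.some.injEq, Prod.mk.injEq]; omega)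
      · simp only [ValidW]
        exact ⟨by first | trivial | omega, by omega, Or.inr (Or.inl ⟨by first | trivial | omega, by first | trivial | omega, k, hk, by omega, by omega, by omega⟩)⟩
    · -- up, segment ends: turn to left, segment grows
      have hstep : stepW s = ⟨s.x, s.y + 1, -1, 0, s.seg + 1, 0⟩ := by
        simp [stepW, hdx, hdy, hturn]
      rw [hstep]
      have h1 : |s.x| = k + 1 := by rw [hx]; exact abs_of_nonneg (by omega)
      have h2 : |s.y| ≤ k + 1 := abs_le.mpr ⟨by omega, by omega⟩
      have hdet : max |s.x| |s.y| = k + 1 := by rw [h1]; exact max_eq_left h2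
      constructor
      · simp only [next_location]
        rw [hdet]
        split_ifs <;> first | rfl | omega | (simp only [Option.some.injEq, Prod.mk.injEq]; omega)
      · simp only [ValidW]
        exact ⟨by first | trivial | omega, by omega,
          Or.inr (Or.inr (Or.inl ⟨by first | trivial | omega, by first | trivial | omega, k + 1, by omega, by omega, by omega, by omega⟩))⟩
    · -- left, segment ends: turn to down
      have hstep : stepW s = ⟨s.x - 1, s.y, 0, -1, s.seg, 0⟩ := by
        simp [stepW, hdx, hdy, hturn]
        omega
      rw [hstep]
      have h1 : |s.y| = m := by rw [hy]; exact abs_of_nonneg (by omega)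
      have h2 : |s.x| ≤ m := abs_le.mpr ⟨by omega, by omega⟩
      have hdet : max |s.x| |s.y| = m := by rw [h1]; exact max_eq_right h2
      constructor
      · simp only [next_location]
        rw [hdet]
        split_ifs <;> first | rfl | omega | (simp only [Option.some.injEq, Prod.mk.injEq]; omega)
      · simp only [ValidW]
        exact ⟨by first | trivial | omega, by omega,
          Or.inr (Or.inr (Or.inr ⟨by first | trivial | omega, by first | trivial | omega, m, hm, by omega, by omega, by omega⟩))⟩
    · -- down, segment ends: turn to right, segment grows
      have hstep : stepW s = ⟨s.x, s.y - 1, 1, 0, s.seg + 1, 0⟩ := by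
        simp [stepW, hdx, hdy, hturn]
        omega
      rw [hstep]
      have h1 : |s.x| = m := by rw [hx, abs_neg, abs_of_nonneg (by omega)]
      have h2 : |s.y| ≤ m := abs_le.mpr ⟨by omega, by omega⟩
      have hdet : max |s.x| |s.y| = m := by rw [h1]; exact max_eq_left h2
      constructor
      · simp only [next_location]
        rw [hdet]
        split_ifs <;> first | rfl | omega | (simp only [Option.some.injEq, Prod.mk.injEq]; omega)
      · simp only [ValidW]
        exact ⟨by first | trivial | omega, by omega, Or.inl ⟨by first | trivial | omega, by first | trivial | omega, m, by omega, by omega, by omega, by omega⟩⟩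
  · rcases hdir with ⟨hdx, hdy, k, hk, hseg, hx, hy⟩ | ⟨hdx, hdy, k, hk, hseg, hx, hy⟩ |
      ⟨hdx, hdy, m, hm, hseg, hx, hy⟩ | ⟨hdx, hdy, m, hm, hseg, hx, hy⟩
    · -- right, mid-segment
      have hstep : stepW s = ⟨s.x + 1, s.y, 1, 0, s.seg, s.cnt + 1⟩ := by
        simp [stepW, hdx, hdy, hturn]
      rw [hstep]
      have h1 : |s.y| = k := by rw [hy, abs_neg, abs_of_nonneg hk]
      have h2 : |s.x| ≤ k := abs_le.mpr ⟨by omega, by omega⟩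
      have hdet : max |s.x| |s.y| = k := by rw [h1]; exact max_eq_right h2
      constructor
      · simp only [next_location]
        rw [hdet]
        split_ifs <;> first | rfl | omega | (simp only [Option.some.injEq, Prod.mk.injEq]; omega)
      · simp only [ValidW]
        exact ⟨by omega, by omega, Or.inl ⟨by first | trivial | omega, by first | trivial | omega, k, hk, by omega, by omega, by omega⟩⟩
    · -- up, mid-segment
      have hstep : stepW s = ⟨s.x, s.y + 1, 0, 1, s.seg, s.cnt + 1⟩ := by
        simp [stepW, hdx, hdy, hturn]
      rw [hstep]
      have h1 : |s.x| = k + 1 := by rw [hx]; exact abs_of_nonneg (by omega)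
      have h2 : |s.y| ≤ k + 1 := abs_le.mpr ⟨by omega, by omega⟩
      have hdet : max |s.x| |s.y| = k + 1 := by rw [h1]; exact max_eq_left h2
      constructor
      · simp only [next_location]
        rw [hdet]
        split_ifs <;> first | rfl | omega | (simp only [Option.some.injEq, Prod.mk.injEq]; omega)
      · simp only [ValidW]
        exact ⟨by omega, by omega, Or.inr (Or.inl ⟨by first | trivial | omega, by first | trivial | omega, k, hk, by omega, by omega, by omega⟩)⟩
    · -- left, mid-segment
      have hstep : stepW s = ⟨s.x - 1, s.y, -1, 0, s.seg, s.cnt + 1⟩ := by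
        simp [stepW, hdx, hdy, hturn]
        omega
      rw [hstep]
      have h1 : |s.y| = m := by rw [hy]; exact abs_of_nonneg (by omega)
      have h2 : |s.x| ≤ m := abs_le.mpr ⟨by omega, by omega⟩
      have hdet : max |s.x| |s.y| = m := by rw [h1]; exact max_eq_right h2
      constructor
      · simp only [next_location]
        rw [hdet]
        split_ifs <;> first | rfl | omega | (simp only [Option.some.injEq, Prod.mk.injEq]; omega)
      · simp only [ValidW]
        exact ⟨by omega, by omega,
          Or.inr (Or.inr (Or.inl ⟨by first | trivial | omega, by first | trivial | omega, m, hm, by omega, by omega, by omega⟩))⟩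
    · -- down, mid-segment
      have hstep : stepW s = ⟨s.x, s.y - 1, 0, -1, s.seg, s.cnt + 1⟩ := by
        simp [stepW, hdx, hdy, hturn]
        omega
      rw [hstep]
      have h1 : |s.x| = m := by rw [hx, abs_neg, abs_of_nonneg (by omega)]
      have h2 : |s.y| ≤ m := abs_le.mpr ⟨by omega, by omega⟩
      have hdet : max |s.x| |s.y| = m := by rw [h1]; exact max_eq_left h2
      constructor
      · simp only [next_location]
        rw [hdet]
        split_ifs <;> first | rfl | omega | (simp only [Option.some.injEq, Prod.mk.injEq]; omega)
      · simp only [ValidW]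
        exact ⟨by omega, by omega,
          Or.inr (Or.inr (Or.inr ⟨by first | trivial | omega, by first | trivial | omega, m, hm, by omega, by omega, by omega⟩))⟩

lemma cost_eq (mem : PySem.Dict (Int × Int) Int) (x y : Int) :
    costA mem (x, y) = costB mem x y := by
  have hg : ∀ (c : Int) (k : Int × Int),
      (if mem.contains k then c + mem.getD k 0 else c) = c + mem.getD k 0 := by
    intro c k
    by_cases h : mem.contains k
    · rw [if_pos h]
    · have h' : mem.contains k = false := by revert h; cases mem.contains k <;> simp
      rw [if_neg h, PySem.Dict.getD_of_not_contains mem 0 h']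
      omega
  simp only [costA, costB, List.foldl_cons, List.foldl_nil, List.flatMap_cons, List.flatMap_nil,
    List.map_cons, List.map_nil, List.append_nil, List.sum_cons, List.sum_nil, List.cons_append, List.nil_append, hg]
  ring

lemma loopA_succ (n : Int) (f : Nat) (mem : PySem.Dict (Int × Int) Int)
    (loc? : Option (Int × Int)) (cost : Int) :
    loopA n (f + 1) mem loc? cost =
      if cost ≤ n then
        match loc? with
        | none => 0
        | some loc => loopA n f (mem.insert loc (costA mem loc))
            (next_location loc.1 loc.2) (costA mem loc)
      else cost := rfl

lemma loopB_succ (n : Int) (f : Nat) (mem : PySem.Dict (Int × Int) Int)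
    (s : WState) (cost : Int) :
    loopB n (f + 1) mem s cost =
      if cost ≤ n then
        loopB n f (mem.insert ((stepW s).x, (stepW s).y) (costB mem (stepW s).x (stepW s).y))
          (stepW s) (costB mem (stepW s).x (stepW s).y)
      else cost := rfl

lemma loop_eq (fuel : Nat) (n : Int) :
    ∀ (mem : PySem.Dict (Int × Int) Int) (s : WState) (cost : Int), ValidW s →
      loopA n fuel mem (next_location s.x s.y) cost = loopB n fuel mem s cost := by
  induction fuel with
  | zero => intro mem s cost _; rfl
  | succ f ih =>
    intro mem s cost hs
    obtain ⟨hnext, hvalid⟩ := step_ok s hs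
    rw [hnext, loopA_succ, loopB_succ]
    by_cases hle : cost ≤ n
    · rw [if_pos hle, if_pos hle]
      dsimp only
      rw [cost_eq]
      exact ih _ (stepW s) _ hvalid
    · rw [if_neg hle, if_neg hle]

theorem spiral2_spec : Claim_equal_spiral2 := by
  unfold Claim_equal_spiral2
  intro n _
  unfold Spec_spiral2 spiral2 spiral2_alt
  have h0 : ValidW ⟨0, 0, 1, 0, 1, 0⟩ := by
    simp only [ValidW]
    exact ⟨by first | trivial | omega, by norm_num, Or.inl ⟨by first | trivial | omega, by first | trivial | omega, 0, by norm_num⟩⟩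
  have h := loop_eq 256 n ((PySem.Dict.empty).insert (0, 0) 1) ⟨0, 0, 1, 0, 1, 0⟩ 0 h0
  dsimp only at h
  rw [show next_location 0 0 = some (1, 0) from by decide] at h
  exact h
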